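-- pv_equiv track=rewrite | github.com/jjwang1118/hashcat_password_structure_analysis | graph/other/prefix_postfix_time_random.py | classify_position
-- ===== SOURCE A (Python) =====
-- import string
--
-- LOWER_CHARS = set(string.ascii_lowercase)
--
-- UPPER_CHARS = set(string.ascii_uppercase)
--
-- DIGIT_CHARS = set(string.digits)
--
-- def is_special_char(char):
--     """判斷字符是否為特殊字符（非字母、非數字）"""
--     return char not in LOWER_CHARS and char not in UPPER_CHARS and char not in DIGIT_CHARS
--
-- def classify_position(password):
--     """
--     分類密碼中特殊字符的位置
--     Returns: 'prefix', 'suffix', 'mixed', 'none'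
--     """
--     if not password:
--         return 'none'
--
--     # 找出所有特殊字符的位置
--     special_positions = [i for i, char in enumerate(password) if is_special_char(char)]
--
--     if not special_positions:
--         return 'none'
--
--     # 檢查特殊字符是否都在開頭
--     # 前綴：所有特殊字符都在前面，且是連續的
--     if special_positions[0] == 0:
--         # 檢查是否連續
--         expected = list(range(len(special_positions)))
--         if special_positions == expected:
--             return 'prefix'
--
--     # 檢查特殊字符是否都在結尾
--     # 後綴：所有特殊字符都在後面，且是連續的
--     if special_positions[-1] == len(password) - 1:
--         # 檢查是否連續
--         expected = list(range(len(password) - len(special_positions), len(password)))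
--         if special_positions == expected:
--             return 'suffix'
--
--     # 其他情況視為混合
--     return 'mixed'
-- ===== SOURCE B (Python) =====
-- def _is_special(ch):
--     return not ('a' <= ch <= 'z' or 'A' <= ch <= 'Z' or '0' <= ch <= '9')
--
-- def classify_position(password):
--     total = sum(1 for ch in password if _is_special(ch))
--     if total == 0:
--         return 'none'
--     lead = 0
--     for ch in password:
--         if not _is_special(ch):
--             break
--         lead += 1
--     trail = 0
--     for ch in reversed(password):
--         if not _is_special(ch):
--             break
--         trail += 1
--     if lead == total:
--         return 'prefix'
--     if trail == total:
--         return 'suffix'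
--     return 'mixed'
-- ===== Notes on version B (the rewrite author's own statement) =====
-- stated objective: simpler
-- what changed: B replaces A's list of special-char indices and its comparisons against constructed range lists by three counters (total specials, leading run length, trailing run length) and decides prefix/suffix/mixed by comparing the run lengths to the total.
import Mathlib
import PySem

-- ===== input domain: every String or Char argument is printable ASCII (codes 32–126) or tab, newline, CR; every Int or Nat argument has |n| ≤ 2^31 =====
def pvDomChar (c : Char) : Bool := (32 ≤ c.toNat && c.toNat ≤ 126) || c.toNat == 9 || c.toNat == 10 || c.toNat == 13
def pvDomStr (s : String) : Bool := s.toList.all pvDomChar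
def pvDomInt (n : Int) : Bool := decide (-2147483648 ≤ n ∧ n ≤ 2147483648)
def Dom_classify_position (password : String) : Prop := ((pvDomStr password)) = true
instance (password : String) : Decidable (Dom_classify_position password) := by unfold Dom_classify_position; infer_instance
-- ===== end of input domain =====

-- B replaces A's index-list-vs-range comparison by three counters (total, leading run, trailing run): simpler decomposition, same O(n) cost.

-- ===== PORT A =====
def LOWER_CHARS : PySem.Set Char := PySem.Set.ofList "abcdefghijklmnopqrstuvwxyz".toList
def UPPER_CHARS : PySem.Set Char := PySem.Set.ofList "ABCDEFGHIJKLMNOPQRSTUVWXYZ".toList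
def DIGIT_CHARS : PySem.Set Char := PySem.Set.ofList "0123456789".toList

def is_special_char (c : Char) : Bool :=
  !(LOWER_CHARS.contains c) && !(UPPER_CHARS.contains c) && !(DIGIT_CHARS.contains c)

def classify_position (password : String) : String :=
  let cs := password.toList
  if cs.isEmpty then "none"
  else
    let sp := ((PySem.List.enumerate cs 0).filter (fun p => is_special_char p.2)).map (·.1)
    match sp with
    | [] => "none"
    | h0 :: t =>
      if h0 = 0 ∧ h0 :: t = PySem.List.pyRange 0 (((h0 :: t).length : Int)) 1 then "prefix"
      else if (h0 :: t).getLast (by simp) = (cs.length : Int) - 1 ∧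
              h0 :: t = PySem.List.pyRange ((cs.length : Int) - ((h0 :: t).length : Int)) (cs.length : Int) 1 then "suffix"
      else "mixed"

-- ===== PORT B =====
def bSpecial (c : Char) : Bool :=
  !(('a' ≤ c && c ≤ 'z') || ('A' ≤ c && c ≤ 'Z') || ('0' ≤ c && c ≤ '9'))

def classify_position_alt (password : String) : String :=
  let cs := password.toList
  let total := cs.countP bSpecial
  if total = 0 then "none"
  else
    let lead := (cs.takeWhile bSpecial).length
    let trail := (cs.reverse.takeWhile bSpecial).length
    if lead = total then "prefix"
    else if trail = total then "suffix"
    else "mixed"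

-- ===== PRECONDITION & SPEC =====
def Spec_classify_position (password : String) (out : String) : Prop := out = classify_position_alt password
instance (password : String) (out : String) : Decidable (Spec_classify_position password out) := by unfold Spec_classify_position; infer_instance

-- ===== CLAIM (what is proved, stated in full; the proofs are below) =====
def Claim_equal_classify_position : Prop := ∀ (password : String), Dom_classify_position password → Spec_classify_position password (classify_position password)

-- ===== LEMMAS AND PROOFS =====

-- the positions list A builds, generalized over the start index
def pvPos (q : Char → Bool) (cs : List Char) (i : Int) : List Int :=
  ((PySem.List.enumerate cs i).filter (fun p => q p.2)).map (·.1)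

theorem pvPos_nil (q : Char → Bool) (i : Int) : pvPos q [] i = [] := rfl

theorem pvPos_cons_pos (q : Char → Bool) (c : Char) (cs : List Char) (i : Int) (h : q c = true) :
    pvPos q (c :: cs) i = i :: pvPos q cs (i + 1) := by
  simp [pvPos, PySem.List.enumerate_cons, List.filter, h]

theorem pvPos_cons_neg (q : Char → Bool) (c : Char) (cs : List Char) (i : Int) (h : q c = false) :
    pvPos q (c :: cs) i = pvPos q cs (i + 1) := by
  simp [pvPos, PySem.List.enumerate_cons, List.filter, h]

theorem pvPos_length (q : Char → Bool) (cs : List Char) (i : Int) :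
    (pvPos q cs i).length = cs.countP q := by
  induction cs generalizing i with
  | nil => rfl
  | cons c cs ih =>
    cases h : q c
    · rw [pvPos_cons_neg q c cs i h, List.countP_cons_of_neg (by simp [h]), ih]
    · rw [pvPos_cons_pos q c cs i h, List.countP_cons_of_pos (by simp [h]),
        List.length_cons, ih]

theorem pvPos_mem_le (q : Char → Bool) (cs : List Char) (i : Int) :
    ∀ x ∈ pvPos q cs i, i ≤ x := by
  induction cs generalizing i with
  | nil => simp [pvPos_nil]
  | cons c cs ih =>
    intro x hx
    have step : ∀ y ∈ pvPos q cs (i + 1), i ≤ y := fun y hy => by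
      have := ih (i + 1) y hy; omega
    cases h : q c
    · rw [pvPos_cons_neg q c cs i h] at hx
      exact step x hx
    · rw [pvPos_cons_pos q c cs i h] at hx
      rcases List.mem_cons.mp hx with rfl | hx
      · omega
      · exact step x hx

theorem pvTakeWhile_le_countP (q : Char → Bool) (cs : List Char) :
    (cs.takeWhile q).length ≤ cs.countP q := by
  induction cs with
  | nil => simp
  | cons c cs ih =>
    cases h : q c
    · rw [List.takeWhile_cons_of_neg (by simp [h]), List.countP_cons_of_neg (by simp [h])]
      simp
    · rw [List.takeWhile_cons_of_pos (by simp [h]), List.countP_cons_of_pos (by simp [h]),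
        List.length_cons]
      omega

theorem pvTakeWhile_all (q : Char → Bool) (cs : List Char) (h : cs.countP q = cs.length) :
    cs.takeWhile q = cs := by
  induction cs with
  | nil => rfl
  | cons c cs ih =>
    have hle : cs.countP q ≤ cs.length := List.countP_le_length
    cases hc : q c
    · rw [List.countP_cons_of_neg (by simp [hc]), List.length_cons] at h
      omega
    · rw [List.countP_cons_of_pos (by simp [hc]), List.length_cons] at h
      rw [List.takeWhile_cons_of_pos (by simp [hc]), ih (by omega)]

-- trailing-run step lemma
theorem pvTrail_cons (q : Char → Bool) (c : Char) (cs : List Char) :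
    ((c :: cs).reverse.takeWhile q).length =
      if (cs.reverse.takeWhile q).length = cs.length then
        cs.length + (if q c then 1 else 0)
      else (cs.reverse.takeWhile q).length := by
  rw [List.reverse_cons, List.takeWhile_append]
  by_cases hall : cs.reverse.takeWhile q = cs.reverse
  · simp [hall]
    cases h : q c <;> simp [List.takeWhile, h]
  · have hlt : (cs.reverse.takeWhile q).length ≠ cs.length := by
      intro he
      exact hall ((List.takeWhile_sublist _).eq_of_length (by simpa using he))
    simp [hall, hlt]

theorem pvPrefix_iff (q : Char → Bool) (cs : List Char) (i : Int) :
    (pvPos q cs i = PySem.List.pyRange i (i + cs.countP q) 1) ↔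
      (cs.takeWhile q).length = cs.countP q := by
  induction cs generalizing i with
  | nil =>
    simp only [pvPos_nil, List.countP_nil, List.takeWhile_nil, List.length_nil,
      Nat.cast_zero, add_zero]
    rw [PySem.List.pyRange_one_eq_nil le_rfl]
    simp
  | cons c cs ih =>
    cases h : q c
    · -- q c = false
      rw [pvPos_cons_neg q c cs i h, List.countP_cons_of_neg (by simp [h]),
        List.takeWhile_cons_of_neg (by simp [h])]
      simp only [List.length_nil]
      by_cases hk : cs.countP q = 0
      · have hnil : pvPos q cs (i + 1) = [] :=
          List.eq_nil_of_length_eq_zero (by rw [pvPos_length, hk])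
        rw [hk, hnil]
        rw [PySem.List.pyRange_one_eq_nil (by simp)]
        simp
      · constructor
        · intro he
          exfalso
          have hlt : i < i + cs.countP q := by
            have : 0 < cs.countP q := Nat.pos_of_ne_zero hk
            omega
          rw [PySem.List.pyRange_one_cons hlt] at he
          have : i ∈ pvPos q cs (i + 1) := by rw [he]; exact List.mem_cons_self
          have := pvPos_mem_le q cs (i + 1) i this
          omega
        · omega
    · -- q c = true
      rw [pvPos_cons_pos q c cs i h, List.countP_cons_of_pos (by simp [h]),
        List.takeWhile_cons_of_pos (by simp [h]), List.length_cons]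
      have hlt : i < i + ((cs.countP q + 1 : Nat) : Int) := by push_cast; omega
      rw [PySem.List.pyRange_one_cons hlt]
      have harg : (i + 1) + ((cs.countP q : Nat) : Int) = i + ((cs.countP q + 1 : Nat) : Int) := by
        push_cast; ring
      constructor
      · intro he
        have hinj := (List.cons.injEq _ _ _ _).mp he
        have ht : pvPos q cs (i + 1) = PySem.List.pyRange (i + 1) ((i + 1) + cs.countP q) 1 := by
          rw [hinj.2, harg]
        have := (ih (i + 1)).mp ht
        omega
      · intro he
        have he' : (cs.takeWhile q).length = cs.countP q := by omega
        have := (ih (i + 1)).mpr he'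
        rw [this, harg]

theorem pvSuffix_iff (q : Char → Bool) (cs : List Char) (i : Int) :
    (pvPos q cs i = PySem.List.pyRange (i + cs.length - cs.countP q) (i + cs.length) 1) ↔
      (cs.reverse.takeWhile q).length = cs.countP q := by
  induction cs generalizing i with
  | nil =>
    simp only [pvPos_nil, List.countP_nil, List.length_nil, List.reverse_nil,
      List.takeWhile_nil, Nat.cast_zero, add_zero, sub_zero]
    rw [PySem.List.pyRange_one_eq_nil le_rfl]
    simp
  | cons c cs ih =>
    have hkn : cs.countP q ≤ cs.length := List.countP_le_length
    have htle := pvTakeWhile_le_countP q cs.reverse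
    rw [List.countP_reverse] at htle
    rw [pvTrail_cons, List.length_cons]
    cases h : q c
    · -- q c = false : the trailing run is unchanged
      rw [pvPos_cons_neg q c cs i h, List.countP_cons_of_neg (by simp [h])]
      simp only [h, Bool.false_eq_true, if_false, Nat.add_zero]
      have htr : (if (cs.reverse.takeWhile q).length = cs.length then
            cs.length else (cs.reverse.takeWhile q).length) = (cs.reverse.takeWhile q).length := by
        split <;> omega
      rw [htr]
      constructor
      · intro he
        apply (ih (i + 1)).mp
        rw [he]; congr 1 <;> push_cast <;> ring
      · intro he
        have := (ih (i + 1)).mpr he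
        rw [this]; congr 1 <;> push_cast <;> ring
    · -- q c = true
      rw [pvPos_cons_pos q c cs i h, List.countP_cons_of_pos (by simp [h])]
      simp only [h, if_true]
      have hlt : i + (((cs.length + 1 : Nat)) : Int) - (((cs.countP q + 1 : Nat)) : Int)
          < i + ((cs.length + 1 : Nat) : Int) := by push_cast; omega
      rw [PySem.List.pyRange_one_cons hlt]
      by_cases hnk : cs.countP q = cs.length
      · -- all of cs is special
        have hall : (cs.reverse.takeWhile q).length = cs.length := by
          have := pvTakeWhile_all q cs.reverse
            (by rw [List.countP_reverse, List.length_reverse]; exact hnk)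
          rw [this, List.length_reverse]
        have htc : (cs.reverse.takeWhile q).length = cs.countP q := by omega
        constructor
        · intro _
          rw [if_pos hall]
          omega
        · intro _
          have htail : pvPos q cs (i + 1) =
              PySem.List.pyRange ((i + 1) + cs.length - cs.countP q) ((i + 1) + cs.length) 1 :=
            (ih (i + 1)).mpr htc
          rw [htail]
          congr 1
          · push_cast; omega
          · congr 1 <;> push_cast <;> omega
      · -- not all of cs special: both sides false
        have hklt : cs.countP q < cs.length := lt_of_le_of_ne hkn hnk
        constructor
        · intro he
          exfalso
          have := ((List.cons.injEq _ _ _ _).mp he).1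
          push_cast at this
          omega
        · intro he
          exfalso
          have htrne : (cs.reverse.takeWhile q).length ≠ cs.length := by omega
          rw [if_neg htrne] at he
          omega

-- last element of a nonempty increasing range is stop - 1
theorem pvRange_getLast? (a b : Int) (h : a < b) :
    (PySem.List.pyRange a b 1).getLast? = some (b - 1) := by
  have hsplit : PySem.List.pyRange a b 1 = PySem.List.pyRange a (b - 1) 1 ++ [b - 1] := by
    have := PySem.List.pyRange_one_succ_right (a := a) (b := b - 1) (by omega)
    rw [show b - 1 + 1 = b by ring] at this
    exact this
  rw [hsplit, List.getLast?_concat]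

-- is_special_char agrees with bSpecial on the printable domain
theorem pvSpecial_eq (c : Char) (hc : pvDomChar c = true) : is_special_char c = bSpecial c := by
  have h0 : c.toNat ≤ 126 := by
    simp only [pvDomChar, Bool.or_eq_true, Bool.and_eq_true, decide_eq_true_eq, beq_iff_eq] at hc
    omega
  obtain ⟨n, hn, rfl⟩ : ∃ n, n ≤ 126 ∧ Char.ofNat n = c := by
    refine ⟨c.toNat, h0, ?_⟩
    exact Char.ofNat_toNat c
  interval_cases n <;> decide

theorem pvCountP_congr (q r : Char → Bool) (cs : List Char) (h : ∀ c ∈ cs, q c = r c) :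
    cs.countP q = cs.countP r := by
  induction cs with
  | nil => rfl
  | cons c cs ih =>
    rw [List.countP_cons, List.countP_cons, h c List.mem_cons_self,
        ih (fun x hx => h x (List.mem_cons_of_mem _ hx))]

theorem pvTakeWhile_congr (q r : Char → Bool) (cs : List Char) (h : ∀ c ∈ cs, q c = r c) :
    cs.takeWhile q = cs.takeWhile r := by
  induction cs with
  | nil => rfl
  | cons c cs ih =>
    simp only [List.takeWhile_cons, h c List.mem_cons_self]
    cases r c
    · rfl
    · rw [ih (fun x hx => h x (List.mem_cons_of_mem _ hx))]

-- ===== VERDICT (by name: the statement is the Claim_ definition above) =====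
theorem classify_position_spec : Claim_equal_classify_position := by
  intro password hdom
  have hdom0 : ∀ c ∈ password.toList, pvDomChar c = true := by
    have : pvDomStr password = true := hdom
    simpa [pvDomStr, List.all_eq_true] using this
  unfold Spec_classify_position
  simp only [classify_position, classify_position_alt]
  generalize password.toList = cs at hdom0
  have hq : ∀ c ∈ cs, is_special_char c = bSpecial c := fun c hc => pvSpecial_eq c (hdom0 c hc)
  -- rewrite B's data to the A-side predicate
  rw [(pvCountP_congr is_special_char bSpecial cs hq).symm,
      (pvTakeWhile_congr is_special_char bSpecial cs hq).symm,
      (pvTakeWhile_congr is_special_char bSpecial cs.reverse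
        (fun c hc => hq c (List.mem_reverse.mp hc))).symm]
  have hspdef : ((PySem.List.enumerate cs 0).filter (fun p => is_special_char p.2)).map (·.1)
      = pvPos is_special_char cs 0 := rfl
  rw [hspdef]
  set q := is_special_char with hqdef
  set k := cs.countP q with hk
  by_cases hemp : cs.isEmpty
  · have hnil : cs = [] := by simpa [List.isEmpty_iff] using hemp
    subst hnil
    simp [pvPos_nil, hk]
  rw [if_neg hemp]
  have hlen : (pvPos q cs 0).length = k := pvPos_length q cs 0
  by_cases hk0 : k = 0
  · have hnil : pvPos q cs 0 = [] := List.eq_nil_of_length_eq_zero (by rw [hlen, hk0])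
    rw [hnil, if_pos hk0]
  · obtain ⟨h0, t, hsp⟩ : ∃ h0 t, pvPos q cs 0 = h0 :: t := by
      cases hx : pvPos q cs 0 with
      | nil => exact absurd (by rw [← hlen, hx]; rfl) (Ne.symm hk0)
      | cons a b => exact ⟨a, b, rfl⟩
    rw [hsp, if_neg hk0]
    dsimp only
    have hlent : (h0 :: t).length = k := by rw [← hsp, hlen]
    have hkpos : 0 < k := Nat.pos_of_ne_zero hk0
    have hkn : k ≤ cs.length := hk ▸ List.countP_le_length
    -- characterize A's prefix condition
    have hpre : (h0 = 0 ∧ h0 :: t = PySem.List.pyRange 0 (((h0 :: t).length : Int)) 1) ↔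
        (cs.takeWhile q).length = k := by
      rw [hlent]
      constructor
      · intro he
        rw [hk]
        exact (pvPrefix_iff q cs 0).mp (by rw [hsp, he.2, ← hk]; congr 1; omega)
      · intro he
        have h1 := (pvPrefix_iff q cs 0).mpr (by rw [← hk]; exact he)
        rw [hsp] at h1
        have he2 : h0 :: t = PySem.List.pyRange 0 (k : Int) 1 := by
          rw [h1, ← hk]; congr 1; omega
        have he3 : h0 :: t = (0 : Int) :: PySem.List.pyRange 1 (k : Int) 1 := by
          rw [he2, PySem.List.pyRange_one_cons (by exact_mod_cast hkpos)]
          norm_num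
        exact ⟨((List.cons.injEq _ _ _ _).mp he3).1, he2⟩
    -- characterize A's suffix condition
    have hsuf : ((h0 :: t).getLast (by simp) = (cs.length : Int) - 1 ∧
        h0 :: t = PySem.List.pyRange ((cs.length : Int) - ((h0 :: t).length : Int)) (cs.length : Int) 1) ↔
        (cs.reverse.takeWhile q).length = k := by
      rw [hlent]
      constructor
      · intro he
        rw [hk]
        exact (pvSuffix_iff q cs 0).mp (by rw [hsp, he.2, ← hk]; congr 1 <;> push_cast <;> ring)
      · intro he
        have h1 := (pvSuffix_iff q cs 0).mpr (by rw [← hk]; exact he)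
        rw [hsp] at h1
        have he2 : h0 :: t = PySem.List.pyRange ((cs.length : Int) - (k : Int)) (cs.length : Int) 1 := by
          rw [h1, ← hk]; congr 1 <;> push_cast <;> ring
        have hltr : ((cs.length : Int) - (k : Int)) < (cs.length : Int) := by
          have : (0 : Int) < k := by exact_mod_cast hkpos
          omega
        refine ⟨?_, he2⟩
        have hgl : (h0 :: t).getLast? = some ((cs.length : Int) - 1) := by
          rw [he2]
          exact pvRange_getLast? ((cs.length : Int) - (k : Int)) (cs.length : Int) hltr
        have hgl2 : (h0 :: t).getLast? = some ((h0 :: t).getLast (by simp)) :=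
          List.getLast?_eq_getLast (by simp)
        rw [hgl] at hgl2
        exact (Option.some.injEq _ _).mp hgl2.symm
    -- now case on B's branches
    by_cases hl : (cs.takeWhile q).length = k
    · rw [if_pos (hpre.mpr hl), if_pos hl]
    · rw [if_neg (fun hh => hl (hpre.mp hh)), if_neg hl]
      by_cases ht : (cs.reverse.takeWhile q).length = k
      · rw [if_pos (hsuf.mpr ht), if_pos ht]
      · rw [if_neg (fun hh => ht (hsuf.mp hh)), if_neg ht]
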